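-- pv_equiv track=rewrite | github.com/barraz4/K-repeat-free-algorithm | Expantion.py | is_lyndon
-- ===== SOURCE A (Python) =====
-- def is_lyndon(word):
--     """
--     Determines if the given binary word is a Lyndon word.
--
--     Args:
--     word (str): The binary word to check.
--
--     Returns:
--     bool: True if the word is a Lyndon word, False otherwise.
--     """
--     n = len(word)
--     # A word of length 1 is always a Lyndon word
--     if n == 1:
--         return True
--
--     # Compare the word with all its rotations
--     for i in range(1, n):
--         if word > word[i:] + word[:i]:
--             return False
--     return True
-- ===== SOURCE B (Python) =====
-- def is_lyndon(word):
--     # Duval-style necklace check: maintain p, the length of the longest Lyndon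
--     # prefix period of word[:j+1], in one left-to-right pass; the word is
--     # lexicographically minimal among its rotations iff p divides len(word).
--     n = len(word)
--     p = 1
--     for j in range(1, n):
--         if word[j] < word[j - p]:
--             return False
--         if word[j] > word[j - p]:
--             p = j + 1
--     return n % p == 0
-- ===== Notes on version B (the rewrite author's own statement) =====
-- stated objective: faster
-- what changed: Replaces the loop that compares the word with each of its n rotations by Duval's single-pass necklace check, which maintains the Lyndon-prefix period p over one left-to-right scan and answers n % p == 0.
import Mathlib
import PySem

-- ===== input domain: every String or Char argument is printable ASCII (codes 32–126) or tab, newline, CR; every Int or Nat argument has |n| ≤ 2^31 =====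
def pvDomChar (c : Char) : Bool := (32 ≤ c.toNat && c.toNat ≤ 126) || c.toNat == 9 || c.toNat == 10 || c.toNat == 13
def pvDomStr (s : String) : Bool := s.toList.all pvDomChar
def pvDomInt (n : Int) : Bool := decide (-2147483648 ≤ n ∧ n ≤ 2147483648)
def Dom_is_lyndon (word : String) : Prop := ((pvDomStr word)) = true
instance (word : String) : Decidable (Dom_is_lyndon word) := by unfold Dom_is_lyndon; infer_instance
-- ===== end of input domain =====

-- B replaces A's quadratic compare-against-every-rotation loop by Duval's single-pass
-- necklace check: it maintains p, the period of the longest Lyndon-prefix structure of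
-- word[:j+1], and answers n % p == 0 (objective: faster, one O(n) pass).

-- ===== PORT A =====
-- the 'for i in range(1, n): if word > word[i:] + word[:i]: return False' loop with early return
def isLyndonLoopA (w : List Char) : List Int → Bool
  | [] => true
  | i :: rest =>
    if w > (PySem.List.slice w (some i) none ++ PySem.List.slice w none (some i)) then false
    else isLyndonLoopA w rest

-- A's body on the word's characters (n = len(word); length-1 early return; rotation loop)
def isLyndonCoreA (w : List Char) : Bool :=
  if w.length = 1 then true
  else isLyndonLoopA w (PySem.List.pyRange 1 (w.length : Int) 1)

def is_lyndon (word : String) : Bool := isLyndonCoreA word.toList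

-- ===== PORT B =====
-- the 'for j in range(1, n)' pass of Source B: compare word[j] with word[j-p], fail / bump p / keep p
-- (loop indices are always in range in Source B, so the in-range access word[j] is ported as getD)
def duvalLoop (w : List Char) (js : List Nat) (p : Nat) : Option Nat :=
  match js with
  | [] => some p
  | j :: rest =>
    if w.getD j 'a' < w.getD (j - p) 'a' then none
    else if w.getD (j - p) 'a' < w.getD j 'a' then duvalLoop w rest (j + 1)
    else duvalLoop w rest p

-- B's body: run the pass from j = 1 with p = 1, then return n % p == 0
def isLyndonCoreB (w : List Char) : Bool :=
  match duvalLoop w (List.range' 1 (w.length - 1)) 1 with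
  | some p => decide (w.length % p = 0)
  | none => false

def is_lyndon_alt (word : String) : Bool := isLyndonCoreB word.toList

-- ===== PRECONDITION & SPEC =====
def Spec_is_lyndon (word : String) (out : Bool) : Prop := out = is_lyndon_alt word
instance (word : String) (out : Bool) : Decidable (Spec_is_lyndon word out) := by unfold Spec_is_lyndon; infer_instance

-- ===== CLAIM (what is proved, stated in full; the proofs are below) =====
def Claim_equal_is_lyndon : Prop := ∀ (word : String), Dom_is_lyndon word → Spec_is_lyndon word (is_lyndon word)

-- ===== LEMMAS AND PROOFS =====

-- getD bridges ---------------------------------------------------------------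

theorem pvGetD_take (w : List Char) (k i : Nat) (h1 : i < k) (h2 : i < w.length) :
    (w.take k).getD i 'a' = w.getD i 'a' := by
  rw [List.getD_eq_getElem _ _ (by simp [h1, h2] : i < (w.take k).length),
      List.getD_eq_getElem _ _ h2]
  exact List.getElem_take

theorem pvGetD_drop (w : List Char) (i q : Nat) (h : i + q < w.length) :
    (w.drop i).getD q 'a' = w.getD (i + q) 'a' := by
  have hq : q < (w.drop i).length := by simp; omega
  rw [List.getD_eq_getElem _ _ hq, List.getD_eq_getElem _ _ h]
  exact List.getElem_drop

-- a position of the rotation w.drop i ++ w.take i, read back in w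
theorem pvRot_getD (w : List Char) (i idx : Nat) (hi : i ≤ w.length) (hidx : idx < w.length) :
    (w.drop i ++ w.take i).getD idx 'a' =
      if idx < w.length - i then w.getD (i + idx) 'a'
      else w.getD (idx - (w.length - i)) 'a' := by
  split
  · next h =>
    rw [List.getD_append _ _ _ _ (by simp; omega), pvGetD_drop w i idx (by omega)]
  · next h =>
    push_neg at h
    have hlen : (w.drop i).length = w.length - i := by simp
    rw [List.getD_append_right _ _ _ _ (by omega : (w.drop i).length ≤ idx), hlen,
        pvGetD_take w i _ (by omega) (by omega)]

-- lexicographic order via a first mismatch ------------------------------------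

theorem pvLex_of_mismatch : ∀ (q : Nat) (x y : List Char), q < x.length → q < y.length →
    (∀ i, i < q → x.getD i 'a' = y.getD i 'a') → x.getD q 'a' < y.getD q 'a' → x < y := by
  intro q
  induction q with
  | zero =>
    intro x y hx hy _ hlt
    cases x with
    | nil => simp at hx
    | cons a x' =>
      cases y with
      | nil => simp at hy
      | cons b y' =>
        simp only [List.getD_cons_zero] at hlt
        exact List.cons_lt_cons_iff.mpr (Or.inl hlt)
  | succ n ih =>
    intro x y hx hy hagree hlt
    cases x with
    | nil => simp at hx
    | cons a x' =>
      cases y with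
      | nil => simp at hy
      | cons b y' =>
        have hab : a = b := by simpa using hagree 0 (by omega)
        refine List.cons_lt_cons_iff.mpr (Or.inr ⟨hab, ?_⟩)
        refine ih x' y' (by simpa using hx) (by simpa using hy) ?_ (by simpa using hlt)
        intro i hi
        simpa using hagree (i + 1) (by omega)

theorem pvMismatch_of_lex : ∀ (y x : List Char), x < y → y.length ≤ x.length →
    ∃ q, q < y.length ∧ (∀ i, i < q → x.getD i 'a' = y.getD i 'a') ∧
      x.getD q 'a' < y.getD q 'a' := by
  intro y
  induction y with
  | nil => intro x h _; exact absurd h (List.not_lt_nil x)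
  | cons b y' ih =>
    intro x h hlen
    cases x with
    | nil => simp at hlen
    | cons a x' =>
      rcases List.cons_lt_cons_iff.mp h with hab | ⟨hab, hlt⟩
      · exact ⟨0, by simp, fun i hi => by omega, by simpa using hab⟩
      · obtain ⟨q, hq, hagree, hlt'⟩ := ih x' hlt (by simpa using hlen)
        refine ⟨q + 1, by simpa using hq, ?_, by simpa using hlt'⟩
        intro i hi
        cases i with
        | zero => simpa using hab
        | succ i' => simpa using hagree i' (by omega)

-- periods and the Lyndon-prefix predicate -------------------------------------

def HasPer (w : List Char) (m p : Nat) : Prop :=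
  ∀ idx, idx + p < m → w.getD (idx + p) 'a' = w.getD idx 'a'

def IsLynPre (u : List Char) : Prop :=
  ∀ i, 0 < i → i < u.length → u < u.drop i

theorem pvPer_mod (w : List Char) (m p : Nat) (hp : 0 < p) (hper : HasPer w m p) :
    ∀ idx, idx < m → w.getD idx 'a' = w.getD (idx % p) 'a' := by
  intro idx
  induction idx using Nat.strong_induction_on with
  | _ idx ih =>
    intro hidx
    by_cases h : idx < p
    · rw [Nat.mod_eq_of_lt h]
    · push_neg at h
      have h1 : (idx - p) + p = idx := by omega
      have h2 := hper (idx - p) (by omega)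
      rw [h1] at h2
      rw [h2, ih (idx - p) (by omega) (by omega)]
      congr 1
      conv_rhs => rw [← h1, Nat.add_mod_right]

-- the strict mismatch realizing 'u < u.drop r' for the Lyndon prefix u = w.take p
theorem pvLyn_mismatch (w : List Char) (p : Nat) (hpw : p ≤ w.length)
    (hlyn : IsLynPre (w.take p)) (r : Nat) (h0 : 0 < r) (hr : r < p) :
    ∃ q, q < p - r ∧ (∀ i, i < q → w.getD i 'a' = w.getD (r + i) 'a') ∧
      w.getD q 'a' < w.getD (r + q) 'a' := by
  have hlen : (w.take p).length = p := by simp; omega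
  have hlt := hlyn r h0 (by omega)
  obtain ⟨q, hq, hagree, hmlt⟩ :=
    pvMismatch_of_lex ((w.take p).drop r) (w.take p) hlt (by simp)
  have hdlen : ((w.take p).drop r).length = p - r := by simp [hlen]
  rw [hdlen] at hq
  have hbr : ∀ i, i < p - r → ((w.take p).drop r).getD i 'a' = w.getD (r + i) 'a' := by
    intro i hi
    rw [pvGetD_drop (w.take p) r i (by omega), pvGetD_take w p _ (by omega) (by omega)]
  refine ⟨q, hq, ?_, ?_⟩
  · intro i hi
    have h1 := hagree i hi
    rw [pvGetD_take w p i (by omega) (by omega), hbr i (by omega)] at h1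
    exact h1
  · have h1 := hmlt
    rw [pvGetD_take w p q (by omega) (by omega), hbr q (by omega)] at h1
    exact h1

-- Duval's key lemma: a larger next character makes the whole prefix a Lyndon word
theorem pvKey_lyndon (w : List Char) (m p : Nat) (hp1 : 1 ≤ p) (hpm : p ≤ m)
    (hm : m < w.length) (hper : HasPer w m p) (hlyn : IsLynPre (w.take p))
    (hc : w.getD (m % p) 'a' < w.getD m 'a') : IsLynPre (w.take (m + 1)) := by
  intro i hi0 hile
  have hlen : (w.take (m + 1)).length = m + 1 := by simp; omega
  rw [hlen] at hile
  have hv : ∀ q, q < m + 1 → (w.take (m + 1)).getD q 'a' = w.getD q 'a' := by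
    intro q hq; exact pvGetD_take w (m + 1) q hq (by omega)
  have hvd : ∀ q, i + q < m + 1 → ((w.take (m + 1)).drop i).getD q 'a' = w.getD (i + q) 'a' := by
    intro q hq
    rw [pvGetD_drop (w.take (m + 1)) i q (by omega), hv (i + q) hq]
  have hvdlen : ((w.take (m + 1)).drop i).length = m + 1 - i := by simp [hlen]
  have hmod := pvPer_mod w m p (by omega) hper
  have hdm : p * (i / p) + i % p = i := Nat.div_add_mod i p
  rcases Nat.eq_zero_or_pos (i % p) with hr | hr
  · -- i is a multiple of p: mismatch at position m - i against the final character
    apply pvLex_of_mismatch (m - i)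
    · omega
    · omega
    · intro idx hidx
      rw [hv idx (by omega), hvd idx (by omega),
          hmod idx (by omega), hmod (i + idx) (by omega)]
      congr 1
      conv_rhs => rw [show i + idx = p * (i / p) + idx by omega, Nat.mul_add_mod]
    · rw [hv (m - i) (by omega), hvd (m - i) (by omega), show i + (m - i) = m by omega,
          hmod (m - i) (by omega)]
      have hmp : (m - i) % p = m % p := by
        conv_rhs => rw [show m = p * (i / p) + (m - i) by omega, Nat.mul_add_mod]
      rw [hmp]; exact hc
  · -- i = p*(i/p) + r with 0 < r < p: use the Lyndon mismatch of u against u.drop r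
    have hrp : i % p < p := Nat.mod_lt _ (by omega)
    obtain ⟨q0, hq0, hagree, hq0lt⟩ := pvLyn_mismatch w p (by omega) hlyn (i % p) hr hrp
    have hshift : ∀ t, t < p - i % p → i + t < m + 1 → (i + t) % p = i % p + t := by
      intro t ht _
      conv_lhs => rw [show i + t = p * (i / p) + (i % p + t) by omega, Nat.mul_add_mod]
      exact Nat.mod_eq_of_lt (by omega)
    by_cases hcase : i + q0 < m
    · apply pvLex_of_mismatch q0
      · omega
      · omega
      · intro idx hidx
        rw [hv idx (by omega), hvd idx (by omega), hmod (i + idx) (by omega),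
            hshift idx (by omega) (by omega)]
        exact hagree idx hidx
      · rw [hv q0 (by omega), hvd q0 (by omega), hmod (i + q0) (by omega),
            hshift q0 (by omega) (by omega)]
        exact hq0lt
    · push_neg at hcase
      apply pvLex_of_mismatch (m - i)
      · omega
      · omega
      · intro idx hidx
        rw [hv idx (by omega), hvd idx (by omega), hmod (i + idx) (by omega),
            hshift idx (by omega) (by omega)]
        exact hagree idx (by omega)
      · rw [hv (m - i) (by omega), hvd (m - i) (by omega), show i + (m - i) = m by omega]
        have hmp : m % p = i % p + (m - i) := by
          conv_lhs => rw [show m = p * (i / p) + (i % p + (m - i)) by omega, Nat.mul_add_mod]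
          exact Nat.mod_eq_of_lt (by omega)
        have h1 : w.getD (m - i) 'a' ≤ w.getD (i % p + (m - i)) 'a' := by
          rcases Nat.lt_or_ge (m - i) q0 with h | h
          · exact le_of_eq (hagree _ h)
          · have hq : m - i = q0 := by omega
            rw [hq]; exact le_of_lt hq0lt
        calc w.getD (m - i) 'a' ≤ w.getD (i % p + (m - i)) 'a' := h1
          _ < w.getD m 'a' := by rw [← hmp]; exact hc

-- a failing comparison yields a rotation smaller than the whole word
theorem pvFail_rot (w : List Char) (j p : Nat) (hp1 : 1 ≤ p) (hpj : p ≤ j)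
    (hj : j < w.length) (hper : HasPer w j p)
    (hfail : w.getD j 'a' < w.getD (j - p) 'a') :
    ∃ i, 0 < i ∧ i < w.length ∧ (w.drop i ++ w.take i) < w := by
  have hdm : p * (j / p) + j % p = j := Nat.div_add_mod j p
  have hrp : j % p < p := Nat.mod_lt _ (by omega)
  have hjp1 : 1 ≤ j / p := (Nat.one_le_div_iff (by omega)).mpr hpj
  have hi0pos : 0 < p * (j / p) := Nat.mul_pos (by omega) (by omega)
  refine ⟨p * (j / p), hi0pos, by omega, ?_⟩
  have hmod := pvPer_mod w j p (by omega) hper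
  have hlen : (w.drop (p * (j / p)) ++ w.take (p * (j / p))).length = w.length := by
    simp; omega
  apply pvLex_of_mismatch (j % p)
  · omega
  · omega
  · intro idx hidx
    rw [pvRot_getD w _ idx (by omega) (by omega), if_pos (by omega),
        hmod (p * (j / p) + idx) (by omega), Nat.mul_add_mod,
        Nat.mod_eq_of_lt (by omega : idx < p)]
  · rw [pvRot_getD w _ (j % p) (by omega) (by omega), if_pos (by omega), hdm]
    have h2 : w.getD (j - p) 'a' = w.getD (j % p) 'a' := by
      rw [hmod (j - p) (by omega)]
      congr 1
      conv_rhs => rw [show j = (j - p) + p by omega, Nat.add_mod_right]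
    rw [← h2]; exact hfail

-- p divides n: every rotation is ≥ the word
theorem pvFinal_div (w : List Char) (p : Nat) (hp1 : 1 ≤ p)
    (hper : HasPer w w.length p) (hlyn : IsLynPre (w.take p)) (hdvd : p ∣ w.length) :
    ∀ i, 0 < i → i < w.length → ¬ (w.drop i ++ w.take i < w) := by
  intro i hi0 hin
  have hpn : p ≤ w.length := Nat.le_of_dvd (by omega) hdvd
  have hmod := pvPer_mod w w.length p (by omega) hper
  have hlen : (w.drop i ++ w.take i).length = w.length := by simp; omega
  have hdmi : p * (i / p) + i % p = i := Nat.div_add_mod i p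
  rcases Nat.eq_zero_or_pos (i % p) with hr | hr
  · -- p divides i too: the rotation is the word itself
    have hieq : w.drop i ++ w.take i = w := by
      apply List.ext_getElem (by simpa using hlen)
      intro q h1 h2
      rw [← List.getD_eq_getElem _ 'a' h1, ← List.getD_eq_getElem _ 'a' h2,
          pvRot_getD w i q (by omega) (by omega)]
      split
      · next h =>
        rw [hmod (i + q) (by omega), hmod q (by omega)]
        congr 1
        conv_lhs => rw [show i + q = p * (i / p) + q by omega, Nat.mul_add_mod]
      · next h =>
        push_neg at h
        obtain ⟨s, hs⟩ : p ∣ (w.length - i) :=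
          Nat.dvd_sub hdvd (Nat.dvd_of_mod_eq_zero hr)
        rw [hmod (q - (w.length - i)) (by omega), hmod q (by omega)]
        congr 1
        conv_rhs => rw [show q = p * s + (q - (w.length - i)) by omega, Nat.mul_add_mod]
    rw [hieq]; exact lt_irrefl _
  · -- otherwise the word is strictly smaller than the rotation
    have hrp : i % p < p := Nat.mod_lt _ (by omega)
    obtain ⟨K, hK⟩ := hdvd
    have ha : i / p < K := by
      by_contra hcon
      push_neg at hcon
      have := Nat.mul_le_mul_left p hcon
      omega
    have hni : p - i % p ≤ w.length - i := by
      have h1 : i / p + 1 ≤ K := by omega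
      have := Nat.mul_le_mul_left p h1
      rw [Nat.mul_add, Nat.mul_one] at this
      omega
    obtain ⟨q0, hq0, hagree, hq0lt⟩ := pvLyn_mismatch w p hpn hlyn (i % p) hr hrp
    have hshift : ∀ t, t < p - i % p → (i + t) % p = i % p + t := by
      intro t ht
      conv_lhs => rw [show i + t = p * (i / p) + (i % p + t) by omega, Nat.mul_add_mod]
      exact Nat.mod_eq_of_lt (by omega)
    have hwr : w < w.drop i ++ w.take i := by
      apply pvLex_of_mismatch q0
      · omega
      · omega
      · intro idx hidx
        rw [pvRot_getD w i idx (by omega) (by omega), if_pos (by omega),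
            hmod (i + idx) (by omega), hshift idx (by omega)]
        exact hagree idx hidx
      · rw [pvRot_getD w i q0 (by omega) (by omega), if_pos (by omega),
            hmod (i + q0) (by omega), hshift q0 (by omega)]
        exact hq0lt
    exact lt_asymm hwr

-- p does not divide n: the rotation at p*(n/p) is smaller than the word
theorem pvFinal_ndiv (w : List Char) (p : Nat) (hp1 : 1 ≤ p) (hpn : p ≤ w.length)
    (hper : HasPer w w.length p) (hlyn : IsLynPre (w.take p)) (hnd : ¬ p ∣ w.length) :
    ∃ i, 0 < i ∧ i < w.length ∧ (w.drop i ++ w.take i) < w := by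
  have hr : 0 < w.length % p := by
    rcases Nat.eq_zero_or_pos (w.length % p) with h | h
    · exact absurd (Nat.dvd_of_mod_eq_zero h) hnd
    · exact h
  have hdm : p * (w.length / p) + w.length % p = w.length := Nat.div_add_mod w.length p
  have hrp : w.length % p < p := Nat.mod_lt _ (by omega)
  have ha1 : 1 ≤ w.length / p := (Nat.one_le_div_iff (by omega)).mpr hpn
  have hi0pos : 0 < p * (w.length / p) := Nat.mul_pos (by omega) (by omega)
  refine ⟨p * (w.length / p), hi0pos, by omega, ?_⟩
  have hmod := pvPer_mod w w.length p (by omega) hper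
  have hlen : (w.drop (p * (w.length / p)) ++ w.take (p * (w.length / p))).length = w.length := by
    simp; omega
  obtain ⟨q0, hq0, hagree, hq0lt⟩ := pvLyn_mismatch w p hpn hlyn (w.length % p) hr hrp
  apply pvLex_of_mismatch (w.length % p + q0)
  · omega
  · omega
  · intro idx hidx
    rw [pvRot_getD w _ idx (by omega) (by omega)]
    rcases Nat.lt_or_ge idx (w.length - p * (w.length / p)) with h | h
    · rw [if_pos h, hmod (p * (w.length / p) + idx) (by omega), Nat.mul_add_mod,
          Nat.mod_eq_of_lt (by omega : idx < p)]
    · rw [if_neg (by omega)]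
      have hsub : idx - (w.length - p * (w.length / p)) = idx - w.length % p := by omega
      rw [hsub]
      have h1 := hagree (idx - w.length % p) (by omega)
      rw [show w.length % p + (idx - w.length % p) = idx by omega] at h1
      exact h1
  · rw [pvRot_getD w _ _ (by omega) (by omega), if_neg (by omega),
        show w.length % p + q0 - (w.length - p * (w.length / p)) = q0 by omega]
    exact hq0lt

-- the loop invariant: prefix period p, Lyndon prefix w.take p ----------------

theorem pvLoop_inv (w : List Char) : ∀ (k j p : Nat), j + k = w.length → 1 ≤ p → p ≤ j →
    HasPer w j p → IsLynPre (w.take p) →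
    (∀ p', duvalLoop w (List.range' j k) p = some p' →
        1 ≤ p' ∧ p' ≤ w.length ∧ HasPer w w.length p' ∧ IsLynPre (w.take p')) ∧
    (duvalLoop w (List.range' j k) p = none →
        ∃ i, 0 < i ∧ i < w.length ∧ (w.drop i ++ w.take i) < w) := by
  intro k
  induction k with
  | zero =>
    intro j p hjk hp1 hpj hper hlyn
    constructor
    · intro p' hp'
      simp only [List.range'_zero, duvalLoop, Option.some.injEq] at hp'
      subst hp'
      have hj : j = w.length := by omega
      subst hj
      exact ⟨hp1, by omega, hper, hlyn⟩
    · intro h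
      simp [List.range'_zero, duvalLoop] at h
  | succ k ih =>
    intro j p hjk hp1 hpj hper hlyn
    rw [List.range'_succ]
    simp only [duvalLoop]
    by_cases h1 : w.getD j 'a' < w.getD (j - p) 'a'
    · rw [if_pos h1]
      exact ⟨fun p' hp' => by simp at hp',
             fun _ => pvFail_rot w j p hp1 hpj (by omega) hper h1⟩
    · rw [if_neg h1]
      by_cases h2 : w.getD (j - p) 'a' < w.getD j 'a'
      · rw [if_pos h2]
        have hjp : (j - p) % p = j % p := by
          conv_rhs => rw [show j = (j - p) + p by omega, Nat.add_mod_right]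
        have hcj : w.getD (j % p) 'a' < w.getD j 'a' := by
          have h3 := pvPer_mod w j p (by omega) hper (j - p) (by omega)
          rw [hjp] at h3
          rw [← h3]; exact h2
        have hkey : IsLynPre (w.take (j + 1)) :=
          pvKey_lyndon w j p hp1 hpj (by omega) hper hlyn hcj
        have hper' : HasPer w (j + 1) (j + 1) := fun idx h => absurd h (by omega)
        exact ih (j + 1) (j + 1) (by omega) (by omega) (le_refl _) hper' hkey
      · rw [if_neg h2]
        have heq : w.getD (j - p) 'a' = w.getD j 'a' :=
          le_antisymm (not_lt.mp h1) (not_lt.mp h2)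
        have hper' : HasPer w (j + 1) p := by
          intro idx hidx
          rcases Nat.lt_or_ge (idx + p) j with h | h
          · exact hper idx h
          · rw [show idx + p = j by omega, show idx = j - p by omega]
            exact heq.symm
        exact ih (j + 1) p (by omega) hp1 (by omega) hper' hlyn

-- A-side characterization ----------------------------------------------------

theorem loopA_true_iff (w : List Char) (is : List Int) :
    isLyndonLoopA w is = true ↔
      ∀ i ∈ is, ¬ (PySem.List.slice w (some i) none ++ PySem.List.slice w none (some i)) < w := by
  induction is with
  | nil => simp [isLyndonLoopA]
  | cons i rest ih =>
    by_cases h : (PySem.List.slice w (some i) none ++ PySem.List.slice w none (some i)) < w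
    · simp [isLyndonLoopA, h]
    · simp [isLyndonLoopA, h, ih]
      exact fun _ => not_lt.mp h

theorem rotA_eq_rot (w : List Char) (j : Nat) :
    PySem.List.slice w (some (j : Int)) none ++ PySem.List.slice w none (some (j : Int)) =
      w.drop j ++ w.take j := by
  rw [PySem.List.slice_from_natCast, PySem.List.slice_to_natCast]

theorem coreA_char (w : List Char) :
    isLyndonCoreA w = true ↔
      ∀ i : Nat, 0 < i → i < w.length → ¬ (w.drop i ++ w.take i < w) := by
  rw [isLyndonCoreA]
  by_cases h1 : w.length = 1
  · rw [if_pos h1]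
    constructor
    · intro _ i hi0 hin; omega
    · intro _; rfl
  · rw [if_neg h1, loopA_true_iff]
    constructor
    · intro h i hi0 hin
      have hmem : (i : Int) ∈ PySem.List.pyRange 1 (w.length : Int) 1 :=
        PySem.List.mem_pyRange_one.mpr (by omega)
      have := h (i : Int) hmem
      rwa [rotA_eq_rot] at this
    · intro h i hi
      have hib := PySem.List.mem_pyRange_one.mp hi
      have hj : i = ((i.toNat : Nat) : Int) := by omega
      rw [hj, rotA_eq_rot]
      exact h i.toNat (by omega) (by omega)

-- main equality ---------------------------------------------------------------

theorem core_eq (w : List Char) : isLyndonCoreA w = isLyndonCoreB w := by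
  rcases Nat.eq_zero_or_pos w.length with h0 | hpos
  · have hw : w = [] := List.eq_nil_of_length_eq_zero h0
    subst hw; rfl
  · have hinv := pvLoop_inv w (w.length - 1) 1 1 (by omega) (le_refl 1) (le_refl 1)
      (fun idx h => absurd h (by omega))
      (fun i hi0 hile => absurd hile (by simp; omega))
    rw [isLyndonCoreB]
    cases hres : duvalLoop w (List.range' 1 (w.length - 1)) 1 with
    | none =>
      obtain ⟨i, hi0, hin, hlt⟩ := hinv.2 hres
      have hnot : ¬ (isLyndonCoreA w = true) := fun h => (coreA_char w |>.mp h i hi0 hin) hlt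
      simp only [Bool.not_eq_true] at hnot
      rw [hnot]
    | some p' =>
      obtain ⟨hp1, hpn, hper, hlyn⟩ := hinv.1 p' hres
      by_cases hdvd : p' ∣ w.length
      · have hA : isLyndonCoreA w = true :=
          (coreA_char w).mpr (pvFinal_div w p' hp1 hper hlyn hdvd)
        rw [hA]
        obtain ⟨c, hc⟩ := hdvd
        simp [hc, Nat.mul_mod_right]
      · obtain ⟨i, hi0, hin, hlt⟩ := pvFinal_ndiv w p' hp1 hpn hper hlyn hdvd
        have hnot : ¬ (isLyndonCoreA w = true) :=
          fun h => (coreA_char w |>.mp h i hi0 hin) hlt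
        simp only [Bool.not_eq_true] at hnot
        rw [hnot]
        have hne : ¬ (w.length % p' = 0) := fun h => hdvd (Nat.dvd_of_mod_eq_zero h)
        simp [hne]

-- ===== VERDICT (by name: the statement is the Claim_ definition above) =====
theorem is_lyndon_spec : Claim_equal_is_lyndon := by
  intro word _
  exact core_eq word.toList
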